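-- pv_equiv track=rewrite | github.com/ionesu/sandbox | tasks_examples/codility/fix_road_holes.py | solution
-- ===== SOURCE A (Python) =====
-- def solution(S):
--     holes = 0
--     i = 0
--     k = len(S)
--
--     # count potholes, ignoring any potholes that are 1 or 2 'to the right' of a pothole we fixed
--     while i < k:
--
--         if S[i] == 'X':
--             holes += 1
--             i += 3
--
--         else:
--             i += 1
--
--     return holes
-- ===== SOURCE B (Python) =====
-- def solution(S):
--     # two-phase: collect pothole positions, then threshold sweep
--     xs = [i for i in range(len(S)) if S[i] == 'X']
--     holes = 0
--     next_ok = 0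
--     for i in xs:
--         if i >= next_ok:
--             holes += 1
--             next_ok = i + 3
--     return holes
-- ===== Notes on version B (the rewrite author's own statement) =====
-- stated objective: alternative
-- what changed: Replaced the variable-stride pointer walk with a two-phase structure: first collect all pothole indices, then a threshold sweep over that list counting indices at or past a next_ok bound.
import Mathlib
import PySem

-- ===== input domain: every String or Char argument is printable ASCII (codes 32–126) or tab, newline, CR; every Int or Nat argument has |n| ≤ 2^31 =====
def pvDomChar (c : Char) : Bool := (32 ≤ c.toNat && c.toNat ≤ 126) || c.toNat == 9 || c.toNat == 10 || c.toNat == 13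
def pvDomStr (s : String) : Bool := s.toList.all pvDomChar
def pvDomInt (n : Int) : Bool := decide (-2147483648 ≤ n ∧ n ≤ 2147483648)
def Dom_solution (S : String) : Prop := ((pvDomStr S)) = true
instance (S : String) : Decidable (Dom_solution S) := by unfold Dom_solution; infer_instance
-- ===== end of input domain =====

-- B replaces A's variable-stride pointer walk by collecting pothole indices first and
-- sweeping them against a next_ok threshold; same cost, different decomposition.

-- ===== PORT A =====
-- the while loop: i advances by 3 after a fixed pothole, by 1 otherwise.
-- S[i] is read only when i < k, so List.getD is exact here.
def solutionGo (cs : List Char) (k i : Nat) (holes : Int) : Int :=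
  if i < k then
    if cs.getD i ' ' = 'X' then solutionGo cs k (i + 3) (holes + 1)
    else solutionGo cs k (i + 1) holes
  else holes
termination_by k - i
decreasing_by all_goals omega

def solution (S : String) : Int :=
  solutionGo S.toList S.toList.length 0 0

-- ===== PORT B =====
-- [i for i in range(len(S)) if S[i] == 'X']
def idxList (cs : List Char) : List Nat :=
  (List.range cs.length).filter (fun i => cs.getD i ' ' = 'X')

def solution_alt (S : String) : Int :=
  let cs := S.toList
  let xs := idxList cs
  let st := xs.foldl (fun (st : Int × Nat) i => if st.2 ≤ i then (st.1 + 1, i + 3) else st) (0, 0)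
  st.1

-- ===== PRECONDITION & SPEC =====
def Spec_solution (S : String) (out : Int) : Prop := out = solution_alt S
instance (S : String) (out : Int) : Decidable (Spec_solution S out) := by unfold Spec_solution; infer_instance

-- ===== CLAIM (what is proved, stated in full; the proofs are below) =====
def Claim_equal_solution : Prop := ∀ (S : String), Dom_solution S → Spec_solution S (solution S)

-- ===== LEMMAS AND PROOFS =====

-- abstract threshold sweep
def gSweep : List Nat → Nat → Int
  | [], _ => 0
  | x :: xs, t => if t ≤ x then 1 + gSweep xs (x + 3) else gSweep xs t

theorem foldl_eq_gSweep (xs : List Nat) (c : Int) (t : Nat) :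
    (xs.foldl (fun (st : Int × Nat) i => if st.2 ≤ i then (st.1 + 1, i + 3) else st) (c, t)).1
      = c + gSweep xs t := by
  induction xs generalizing c t with
  | nil => simp [gSweep]
  | cons x xs ih =>
    simp only [List.foldl, gSweep]
    by_cases h : t ≤ x
    · simp [h, ih]; ring
    · simp [h, ih]

-- skipping the part of a range below the threshold does not change the sweep
theorem gSweep_drop (q : Nat → Bool) (m a t : Nat) (hat : a ≤ t) :
    gSweep ((List.range' a m).filter q) t = gSweep ((List.range' t (a + m - t)).filter q) t := by
  induction m generalizing a with
  | zero =>
    have h0 : a - t = 0 := by omega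
    simp [h0, gSweep]
  | succ m ih =>
    rcases Nat.eq_or_lt_of_le hat with h | h
    · subst h
      have : a + (m + 1) - a = m + 1 := by omega
      rw [this]
    · have hrec := ih (a + 1) (by omega)
      have harith : a + 1 + m - t = a + (m + 1) - t := by omega
      rw [List.range'_succ]
      by_cases hq : q a
      · simp only [List.filter_cons, hq, if_pos]
        have hlt : ¬ t ≤ a := by omega
        simp only [gSweep, if_neg hlt]
        rw [hrec, harith]
      · simp only [List.filter_cons, hq]
        simp only [Bool.false_eq_true, reduceIte]
        rw [hrec, harith]

-- the sweep is insensitive to the exact threshold below all elements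
theorem gSweep_shift (l : List Nat) : ∀ t t', (∀ x ∈ l, t ≤ x ∧ t' ≤ x) → gSweep l t = gSweep l t' := by
  induction l with
  | nil => intro t t' _; rfl
  | cons x xs ih =>
    intro t t' h
    have hx := h x (by simp)
    simp only [gSweep, if_pos hx.1, if_pos hx.2]

-- main loop invariant: A's loop from position i equals the sweep of the remaining range
theorem solutionGo_eq (cs : List Char) (k : Nat) (hk : k = cs.length) :
    ∀ m i holes, k - i ≤ m →
      solutionGo cs k i holes
        = holes + gSweep (((List.range' i (k - i)).filter (fun j => cs.getD j ' ' = 'X'))) i := by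
  intro m
  induction m with
  | zero =>
    intro i holes hm
    have hik : ¬ i < k := by omega
    have : k - i = 0 := by omega
    rw [solutionGo, if_neg hik, this]
    simp [gSweep]
  | succ m ih =>
    intro i holes hm
    by_cases hik : i < k
    · have hsplit : k - i = (k - (i + 1)) + 1 := by omega
      rw [solutionGo, if_pos hik, hsplit, List.range'_succ]
      by_cases hq : cs.getD i ' ' = 'X'
      · rw [if_pos hq]
        simp only [List.filter_cons, decide_eq_true hq, if_pos]
        simp only [gSweep, le_refl, if_pos]
        rw [ih (i + 3) (holes + 1) (by omega)]
        have hdrop := gSweep_drop (fun j => decide (cs.getD j ' ' = 'X')) (k - (i + 1)) (i + 1) (i + 3) (by omega)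
        have harith : i + 1 + (k - (i + 1)) - (i + 3) = k - (i + 3) := by omega
        rw [harith] at hdrop
        rw [hdrop]
        ring
      · rw [if_neg hq]
        simp only [List.filter_cons, decide_eq_false hq]
        simp only [Bool.false_eq_true, reduceIte]
        rw [ih (i + 1) holes (by omega)]
        congr 1
        apply gSweep_shift
        intro x hx
        refine ⟨?_, ?_⟩ <;>
        · have := List.mem_range'_1.mp (List.mem_filter.mp hx).1
          omega
    · have : k - i = 0 := by omega
      rw [solutionGo, if_neg hik, this]
      simp [gSweep]

-- ===== VERDICT (by name: the statement is the Claim_ definition above) =====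
theorem solution_spec : Claim_equal_solution := by
  intro S _
  unfold Spec_solution solution solution_alt idxList
  rw [solutionGo_eq S.toList S.toList.length rfl (S.toList.length) 0 0 (by omega)]
  rw [foldl_eq_gSweep]
  rw [List.range_eq_range']
  simp
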